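-- pv_equiv track=rewrite | github.com/mcfx/trivm | challenges/obf-tqlctf/compile.py | do_trit_op
-- ===== SOURCE A (Python) =====
-- def do_trit_op(a, b, o):
--     def r3(x):
--         x %= 3
--         return -1 if x == 2 else x
--
--     def to_trits(x):
--         res = []
--         for _ in range(18):
--             t = r3(x)
--             res.append(t)
--             x = (x - t) // 3
--         assert x == 0
--         return res[::-1]
--
--     def from_trits(s):
--         res = 0
--         for t in s:
--             res = res * 3 + t
--         return res
--
--     def bitfunc(a, b):
--         if o == '^':
--             return r3(a + b)
--
--         def chain(x, y, z):
--             if a == z or b == z: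
--                 return z
--             if a == y or b == y:
--                 return y
--             return x
--         if o == '|':
--             return chain(-1, 0, 1)
--         if o == '||':
--             return chain(0, -1, 1)
--         if o == '|||':
--             return chain(0, 1, -1)
--         if o == '&':
--             return chain(1, 0, -1)
--         if o == '&&':
--             return chain(1, -1, 0)
--         if o == '&&&':
--             return chain(-1, 1, 0)
--         if a == 0:
--             return b
--         if b == 0:
--             return a
--         if a == b:
--             return 0
--         if o == '^^':
--             return 1
--         return -1
--     return from_trits(map(bitfunc, to_trits(a), to_trits(b)))
-- ===== SOURCE B (Python) =====
-- def do_trit_op(a, b, o):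
--     # B: single fused loop peeling one balanced trit of a and b per step (LSB-first),
--     # accumulating result += trit_op(ta, tb) * 3**i; no lists, no reverse, no map.
--     def r3(x):
--         x %= 3
--         return -1 if x == 2 else x
--
--     def trit_op(x, y):
--         if o == '^':
--             return r3(x + y)
--
--         def chain(p, q, r):
--             if x == r or y == r:
--                 return r
--             if x == q or y == q:
--                 return q
--             return p
--         if o == '|':
--             return chain(-1, 0, 1)
--         if o == '||':
--             return chain(0, -1, 1)
--         if o == '|||':
--             return chain(0, 1, -1)
--         if o == '&':
--             return chain(1, 0, -1)
--         if o == '&&':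
--             return chain(1, -1, 0)
--         if o == '&&&':
--             return chain(-1, 1, 0)
--         if x == 0:
--             return y
--         if y == 0:
--             return x
--         if x == y:
--             return 0
--         if o == '^^':
--             return 1
--         return -1
--
--     ra, rb = a, b
--     result = 0
--     p = 1
--     for _ in range(18):
--         ta, tb = r3(ra), r3(rb)
--         ra, rb = (ra - ta) // 3, (rb - tb) // 3
--         result += trit_op(ta, tb) * p
--         p *= 3
--     assert ra == 0 and rb == 0
--     return result
-- ===== Notes on version B (the rewrite author's own statement) =====
-- stated objective: alternative
-- what changed: Replaces A's three-pass pipeline (build two 18-trit lists, reverse them, map the per-trit op, fold back) with a single 18-step loop that peels one balanced trit off each number per step and accumulates trit_op(ta,tb)*3^i directly, keeping no lists.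
import Mathlib
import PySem

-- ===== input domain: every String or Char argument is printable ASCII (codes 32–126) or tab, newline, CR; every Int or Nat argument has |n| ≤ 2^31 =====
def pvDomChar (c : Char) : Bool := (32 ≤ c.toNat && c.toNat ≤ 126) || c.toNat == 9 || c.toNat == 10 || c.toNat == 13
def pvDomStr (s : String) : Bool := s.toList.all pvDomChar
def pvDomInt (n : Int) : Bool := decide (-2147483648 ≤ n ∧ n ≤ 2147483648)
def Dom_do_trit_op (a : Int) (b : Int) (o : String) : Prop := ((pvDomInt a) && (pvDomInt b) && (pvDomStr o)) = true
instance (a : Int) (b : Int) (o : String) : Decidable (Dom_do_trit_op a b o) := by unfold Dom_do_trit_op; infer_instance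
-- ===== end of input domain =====

-- B fuses A's three passes (to_trits twice, map, from_trits) into one 18-step loop that peels
-- one balanced trit off each number and accumulates trit_op(ta,tb)*3^i directly (objective: alternative).

-- ===== PORT A =====
def pvR3A (x : Int) : Int :=
  let x := PySem.Int.mod x 3
  if x = 2 then -1 else x

-- 'for _ in range(18)' of to_trits as structural recursion on the remaining count;
-- returns (res in append order, final x).  The 'assert x == 0' raises in Python: excluded by Pre_.
def pvToTritsGo : Nat → Int → List Int × Int
  | 0, x => ([], x)
  | n + 1, x =>
    let t := pvR3A x
    let r := pvToTritsGo n (PySem.Int.floordiv (x - t) 3)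
    (t :: r.1, r.2)

def pvToTrits (x : Int) : List Int := (pvToTritsGo 18 x).1.reverse  -- res[::-1]

def pvFromTrits (s : List Int) : Int := s.foldl (fun res t => res * 3 + t) 0

def pvChainA (a b x y z : Int) : Int :=
  if a = z ∨ b = z then z else if a = y ∨ b = y then y else x

def pvBitfuncA (o : String) (a b : Int) : Int :=
  if o = "^" then pvR3A (a + b)
  else if o = "|" then pvChainA a b (-1) 0 1
  else if o = "||" then pvChainA a b 0 (-1) 1
  else if o = "|||" then pvChainA a b 0 1 (-1)
  else if o = "&" then pvChainA a b 1 0 (-1)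
  else if o = "&&" then pvChainA a b 1 (-1) 0
  else if o = "&&&" then pvChainA a b (-1) 1 0
  else if a = 0 then b
  else if b = 0 then a
  else if a = b then 0
  else if o = "^^" then 1
  else -1

def do_trit_op (a : Int) (b : Int) (o : String) : Int :=
  pvFromTrits (List.zipWith (pvBitfuncA o) (pvToTrits a) (pvToTrits b))

-- ===== PORT B =====
def pvR3B (x : Int) : Int :=
  let x := PySem.Int.mod x 3
  if x = 2 then -1 else x

def pvChainB (x y p q r : Int) : Int :=
  if x = r ∨ y = r then r else if x = q ∨ y = q then q else p

def pvTritOpB (o : String) (x y : Int) : Int :=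
  if o = "^" then pvR3B (x + y)
  else if o = "|" then pvChainB x y (-1) 0 1
  else if o = "||" then pvChainB x y 0 (-1) 1
  else if o = "|||" then pvChainB x y 0 1 (-1)
  else if o = "&" then pvChainB x y 1 0 (-1)
  else if o = "&&" then pvChainB x y 1 (-1) 0
  else if o = "&&&" then pvChainB x y (-1) 1 0
  else if x = 0 then y
  else if y = 0 then x
  else if x = y then 0
  else if o = "^^" then 1
  else -1

-- the single fused loop; the final 'assert ra == 0 and rb == 0' raises in Python: excluded by Pre_.
def pvAltGo (o : String) : Nat → Int → Int → Int → Int → Int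
  | 0, _, _, _, result => result
  | n + 1, ra, rb, p, result =>
    let ta := pvR3B ra
    let tb := pvR3B rb
    pvAltGo o n (PySem.Int.floordiv (ra - ta) 3) (PySem.Int.floordiv (rb - tb) 3)
      (p * 3) (result + pvTritOpB o ta tb * p)

def do_trit_op_alt (a : Int) (b : Int) (o : String) : Int :=
  pvAltGo o 18 a b 1 0

-- ===== PRECONDITION & SPEC =====
-- Pre_ excludes exactly the inputs where both Pythons raise AssertionError: numbers not
-- representable in 18 balanced trits, i.e. |a| or |b| > (3^18-1)/2 = 193710244.
def Pre_do_trit_op (a : Int) (b : Int) (o : String) : Prop :=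
  -193710244 ≤ a ∧ a ≤ 193710244 ∧ -193710244 ≤ b ∧ b ≤ 193710244
instance (a : Int) (b : Int) (o : String) : Decidable (Pre_do_trit_op a b o) := by
  unfold Pre_do_trit_op; infer_instance

def pvWitness_do_trit_op : Int × Int × String := (5, -7, "^")

def Spec_do_trit_op (a : Int) (b : Int) (o : String) (out : Int) : Prop := out = do_trit_op_alt a b o
instance (a : Int) (b : Int) (o : String) (out : Int) : Decidable (Spec_do_trit_op a b o out) := by unfold Spec_do_trit_op; infer_instance

-- ===== CLAIM (what is proved, stated in full; the proofs are below) =====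
def Claim_equal_do_trit_op : Prop := ∀ (a : Int) (b : Int) (o : String), Dom_do_trit_op a b o → Pre_do_trit_op a b o → Spec_do_trit_op a b o (do_trit_op a b o)

-- ===== LEMMAS AND PROOFS =====
theorem pvR3B_eq : pvR3B = pvR3A := rfl

theorem pvTritOpB_eq : pvTritOpB = pvBitfuncA := rfl

theorem pvToTritsGo_length (n : Nat) (x : Int) : (pvToTritsGo n x).1.length = n := by
  induction n generalizing x with
  | zero => rfl
  | succ n ih => simp [pvToTritsGo, ih]

theorem zipWith_reverse' (f : Int → Int → Int) :
    ∀ (l₁ l₂ : List Int), l₁.length = l₂.length →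
      List.zipWith f l₁.reverse l₂.reverse = (List.zipWith f l₁ l₂).reverse := by
  intro l₁ l₂ h
  induction l₁ generalizing l₂ with
  | nil => cases l₂ with | nil => rfl | cons h t => simp at h
  | cons h₁ t₁ ih =>
    cases l₂ with
    | nil => simp at h
    | cons h₂ t₂ =>
      simp only [List.length_cons, Nat.succ_inj] at h
      simp only [List.reverse_cons, List.zipWith_cons_cons]
      rw [List.zipWith_append (by simp [h]), ih t₂ h]
      simp

theorem pvAltGo_eq (o : String) :
    ∀ (n : Nat) (ra rb p acc : Int),
      pvAltGo o n ra rb p acc =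
        acc + p * pvFromTrits
          ((List.zipWith (pvBitfuncA o) (pvToTritsGo n ra).1 (pvToTritsGo n rb).1).reverse) := by
  intro n
  induction n with
  | zero => intro ra rb p acc; simp [pvAltGo, pvToTritsGo, pvFromTrits]
  | succ n ih =>
    intro ra rb p acc
    rw [pvAltGo, ih]
    simp only [pvToTritsGo, pvR3B_eq, pvTritOpB_eq, List.zipWith_cons_cons, List.reverse_cons]
    unfold pvFromTrits
    rw [List.foldl_append]
    simp only [List.foldl_cons, List.foldl_nil]
    ring

theorem do_trit_op_spec : Claim_equal_do_trit_op := by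
  intro a b o _ _
  unfold Spec_do_trit_op do_trit_op do_trit_op_alt pvToTrits
  rw [pvAltGo_eq, zipWith_reverse' _ _ _ (by rw [pvToTritsGo_length, pvToTritsGo_length])]
  ring
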